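-- pv_equiv track=rewrite | github.com/sapirosh10/Thesis---real-data | main.py | calc_lz_distance
-- ===== SOURCE A (Python) =====
-- def calc_lz_distance(source,seq,flagGen,start):
--     count=start
--     if flagGen==0:
--         i=1
--         count=count+1
--     else:
--         seq=source+seq
--         i=len(source)+1
--
--     subStr=seq[i]
--     while i<len(seq):
--         j=i
--         subStr=seq[j]
--         while subStr in seq[0:j]:
--             i=i+1
--             if i>len(seq):
--                 break
--             subStr=seq[j:i+1]
--         count=count+1
--         i=i+1
--
--     return count
-- ===== SOURCE B (Python) =====
-- def calc_lz_distance(source, seq, flagGen, start):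
--     if flagGen == 0:
--         s = seq
--         j = 1
--         count = start + 1
--     else:
--         s = source + seq
--         j = len(source) + 1
--         count = start
--     n = len(s)
--     while j < n:
--         best = 0
--         for k in range(j):
--             m = 0
--             while k + m < j and j + m < n and s[k + m] == s[j + m]:
--                 m += 1
--             if m > best:
--                 best = m
--         j += best + 1
--         count += 1
--     return count
-- ===== Notes on version B (the rewrite author's own statement) =====
-- stated objective: alternative
-- what changed: Per phrase, A repeatedly tests a growing pattern with Python substring search ('subStr in seq[0:j]'); B instead scans each earlier start k once and extends a two-pointer match to compute the longest earlier occurrence directly, then jumps past the whole phrase.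
import Mathlib
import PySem

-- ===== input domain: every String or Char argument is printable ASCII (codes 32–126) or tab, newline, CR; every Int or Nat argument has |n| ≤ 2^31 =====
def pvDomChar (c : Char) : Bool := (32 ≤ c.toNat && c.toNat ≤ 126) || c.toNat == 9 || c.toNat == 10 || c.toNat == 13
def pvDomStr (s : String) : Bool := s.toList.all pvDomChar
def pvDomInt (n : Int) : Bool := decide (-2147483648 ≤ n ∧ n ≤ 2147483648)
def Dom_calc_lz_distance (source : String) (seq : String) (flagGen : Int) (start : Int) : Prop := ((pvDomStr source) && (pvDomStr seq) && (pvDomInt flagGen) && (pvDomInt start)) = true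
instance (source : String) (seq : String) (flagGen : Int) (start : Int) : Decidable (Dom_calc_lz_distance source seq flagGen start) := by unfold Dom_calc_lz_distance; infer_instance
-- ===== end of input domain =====

-- B replaces A's repeated substring-membership tests of a growing pattern by a direct per-phrase
-- longest-earlier-match scan (two-pointer extension from each earlier start); alternative algorithm, same values.

-- ===== PORT A =====
-- A's inner 'while subStr in seq[0:j]:' loop; subStr is the slice seq[j:i+1].
def aInner (s : List Char) (j i : Nat) : Nat :=
  if PySem.Chars.isIn (PySem.List.slice s (some (j : Int)) (some ((i : Int) + 1)))
       (PySem.List.slice s (some 0) (some (j : Int))) = true then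
    (if i + 1 > s.length then i + 1 else aInner s j (i + 1))
  else i
termination_by s.length + 1 - i
decreasing_by omega

-- needed only for aOuter's termination (the outer loop's i never decreases across the inner loop)
theorem aInner_ge (s : List Char) (j i : Nat) : i ≤ aInner s j i := by
  fun_induction aInner <;> omega

-- A's outer 'while i < len(seq):' loop.
def aOuter (s : List Char) (count : Int) (i : Nat) : Int :=
  if i < s.length then aOuter s (count + 1) (aInner s i i + 1) else count
termination_by s.length - i
decreasing_by have := aInner_ge s i i; omega

-- Python's dead pre-loop read 'subStr = seq[i]' only raises IndexError when len(seq) < 2 (excluded by Pre_);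
-- its value is never used (the loop reassigns subStr first).
def calc_lz_distance (source : String) (seq : String) (flagGen : Int) (start : Int) : Int :=
  if flagGen == 0 then aOuter seq.toList (start + 1) 1
  else aOuter (source.toList ++ seq.toList) start (source.toList.length + 1)

-- ===== PORT B =====
-- B's innermost two-pointer extension: while k+m < j and j+m < n and s[k+m] == s[j+m]: m += 1
def bExt (s : List Char) (j k m : Nat) : Nat :=
  if k + m < j ∧ j + m < s.length ∧ s[k + m]? = s[j + m]? then bExt s j k (m + 1) else m
termination_by s.length - m
decreasing_by omega

-- B's 'for k in range(j): … if m > best: best = m'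
def bBest (s : List Char) (j : Nat) : Nat :=
  (List.range j).foldl (fun best k => let m := bExt s j k 0; if best < m then m else best) 0

-- B's 'while j < n:' loop
def bOuter (s : List Char) (count : Int) (j : Nat) : Int :=
  if j < s.length then bOuter s (count + 1) (j + bBest s j + 1) else count
termination_by s.length - j
decreasing_by omega

def calc_lz_distance_alt (source : String) (seq : String) (flagGen : Int) (start : Int) : Int :=
  if flagGen == 0 then bOuter seq.toList (start + 1) 1
  else bOuter (source.toList ++ seq.toList) start (source.toList.length + 1)

-- ===== PRECONDITION & SPEC =====
-- A raises IndexError on the pre-loop 'seq[i]' exactly when len(seq) < 2 (in both flagGen branches).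
def Pre_calc_lz_distance (source : String) (seq : String) (flagGen : Int) (start : Int) : Prop :=
  2 ≤ seq.toList.length
instance (source : String) (seq : String) (flagGen : Int) (start : Int) : Decidable (Pre_calc_lz_distance source seq flagGen start) := by unfold Pre_calc_lz_distance; infer_instance

def pvWitness_calc_lz_distance : String × String × Int × Int := ("ab", "abab", 1, 0)

def Spec_calc_lz_distance (source : String) (seq : String) (flagGen : Int) (start : Int) (out : Int) : Prop := out = calc_lz_distance_alt source seq flagGen start
instance (source : String) (seq : String) (flagGen : Int) (start : Int) (out : Int) : Decidable (Spec_calc_lz_distance source seq flagGen start out) := by unfold Spec_calc_lz_distance; infer_instance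

-- ===== CLAIM (what is proved, stated in full; the proofs are below) =====
def Claim_equal_calc_lz_distance : Prop := ∀ (source : String) (seq : String) (flagGen : Int) (start : Int), Dom_calc_lz_distance source seq flagGen start → Pre_calc_lz_distance source seq flagGen start → Spec_calc_lz_distance source seq flagGen start (calc_lz_distance source seq flagGen start)

-- ===== LEMMAS AND PROOFS =====

-- an earlier occurrence of the length-l pattern starting at j, lying entirely inside s[0:j]
def occ (s : List Char) (j l : Nat) : Prop :=
  ∃ k, k + l ≤ j ∧ (s.drop k).take l = (s.drop j).take l

theorem occ_zero (s : List Char) (j : Nat) : occ s j 0 := ⟨0, by simp⟩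

theorem occ_mono {s : List Char} {j l l' : Nat} (h : occ s j l) (hle : l' ≤ l) : occ s j l' := by
  obtain ⟨k, hk, he⟩ := h
  exact ⟨k, by omega, by
    have := congrArg (List.take l') he
    simpa [List.take_take, Nat.min_eq_left hle] using this⟩

theorem infix_iff_drop {l₁ l₂ : List Char} : l₁ <:+: l₂ ↔ ∃ k, l₁ <+: l₂.drop k := by
  constructor
  · intro h
    obtain ⟨t, hp, hs⟩ := List.infix_iff_prefix_suffix.mp h
    obtain ⟨m, _, rfl⟩ : ∃ m, m ≤ l₂.length ∧ t = l₂.drop m := by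
      rw [List.suffix_iff_eq_drop] at hs
      exact ⟨l₂.length - t.length, by omega, hs⟩
    exact ⟨m, hp⟩
  · rintro ⟨k, hp⟩
    exact hp.isInfix.trans (List.drop_suffix k l₂).isInfix

-- A's membership test, characterised: for 1 ≤ l and j + l ≤ |s|,
-- s[j:j+l] occurs in s[0:j] iff occ s j l
theorem mem_iff (s : List Char) (j l : Nat) (hl : 1 ≤ l) (hjl : j + l ≤ s.length) :
    (PySem.Chars.isIn ((s.drop j).take l) (s.take j) = true) ↔ occ s j l := by
  rw [PySem.Chars.isIn_iff_infix, infix_iff_drop]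
  constructor
  · rintro ⟨k, hp⟩
    have hlen : ((s.drop j).take l).length = l := by
      simp [List.length_take, List.length_drop]; omega
    have hkl : l ≤ j - k := by
      have h' := hp.length_le
      simp [List.length_drop, List.length_take, hlen] at h'
      omega
    refine ⟨k, by omega, ?_⟩
    have hp' := List.prefix_iff_eq_take.mp hp
    rw [hlen] at hp'
    rw [hp', List.drop_take, List.take_take]
    congr 1
    omega
  · rintro ⟨k, hk, he⟩
    refine ⟨k, ?_⟩
    rw [List.prefix_iff_eq_take]
    have hlen : ((s.drop j).take l).length = l := by
      simp [List.length_take, List.length_drop]; omega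
    rw [hlen, List.drop_take, List.take_take, ← he]
    congr 1
    omega

-- the three-way condition of bExt's loop
def bCond (s : List Char) (j k m : Nat) : Prop :=
  k + m < j ∧ j + m < s.length ∧ s[k + m]? = s[j + m]?

theorem bExt_not_cond (s : List Char) (j k m : Nat) : ¬ bCond s j k (bExt s j k m) := by
  fun_induction bExt with
  | case1 m h ih => exact ih
  | case2 m h => exact h

theorem bExt_cond_of_lt (s : List Char) (j k m : Nat) :
    ∀ t, m ≤ t → t < bExt s j k m → bCond s j k t := by
  fun_induction bExt with
  | case1 m h ih =>
    intro t ht hlt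
    rcases Nat.eq_or_lt_of_le ht with rfl | h'
    · exact h
    · exact ih t h' hlt
  | case2 m h => intro t ht hlt; omega

-- l ≤ bExt s j k 0 ↔ the bounds hold and the two segments of length l agree
theorem bExt_ge_iff (s : List Char) (j k l : Nat) (hk : k < j) (hj : j < s.length) :
    l ≤ bExt s j k 0 ↔ k + l ≤ j ∧ j + l ≤ s.length ∧ (s.drop k).take l = (s.drop j).take l := by
  have hseg : ∀ l, (∀ t, t < l → bCond s j k t) ↔
      (k + l ≤ j ∧ j + l ≤ s.length ∧ (s.drop k).take l = (s.drop j).take l) := by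
    intro l
    constructor
    · intro h
      have hb : k + l ≤ j ∧ j + l ≤ s.length := by
        rcases Nat.eq_zero_or_pos l with rfl | hl
        · omega
        · have := h (l - 1) (by omega)
          unfold bCond at this; omega
      refine ⟨hb.1, hb.2, ?_⟩
      apply List.ext_getElem
      · simp [List.length_take, List.length_drop]; omega
      · intro t h1 h2
        have ht : t < l := by simp [List.length_take, List.length_drop] at h1; omega
        obtain ⟨_, _, he⟩ := h t ht
        rw [List.getElem_take, List.getElem_take, List.getElem_drop, List.getElem_drop]
        have h1' : k + t < s.length := by omega
        have h2' : j + t < s.length := by omega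
        rw [List.getElem?_eq_getElem h1', List.getElem?_eq_getElem h2'] at he
        simpa using he
    · rintro ⟨h1, h2, he⟩ t ht
      refine ⟨by omega, by omega, ?_⟩
      have h1' : k + t < s.length := by omega
      have h2' : j + t < s.length := by omega
      rw [List.getElem?_eq_getElem h1', List.getElem?_eq_getElem h2']
      have := congrArg (fun xs => xs[t]?) he
      simp only [List.getElem?_take, List.getElem?_drop] at this
      simp only [ht, if_pos] at this
      rw [List.getElem?_eq_getElem h1', List.getElem?_eq_getElem h2'] at this
      simpa using this
  constructor
  · intro hle
    rw [← hseg]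
    intro t ht
    exact bExt_cond_of_lt s j k 0 t (by omega) (by omega)
  · intro h
    rw [← hseg] at h
    by_contra hc
    push Not at hc
    exact bExt_not_cond s j k 0 (h _ hc)

theorem bBest_spec (s : List Char) (j : Nat) :
    (∀ k, k < j → bExt s j k 0 ≤ bBest s j) ∧
    (bBest s j = 0 ∨ ∃ k, k < j ∧ bBest s j = bExt s j k 0) := by
  have hfun : (fun (best k : Nat) => let m := bExt s j k 0; if best < m then m else best)
      = fun best k => if best < bExt s j k 0 then bExt s j k 0 else best := rfl
  unfold bBest
  rw [hfun]
  have gen : ∀ (ks : List Nat) (b : Nat),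
      (∀ k ∈ ks, bExt s j k 0 ≤ ks.foldl (fun best k => if best < bExt s j k 0 then bExt s j k 0 else best) b) ∧
      b ≤ ks.foldl (fun best k => if best < bExt s j k 0 then bExt s j k 0 else best) b ∧
      (ks.foldl (fun best k => if best < bExt s j k 0 then bExt s j k 0 else best) b = b ∨
        ∃ k ∈ ks, ks.foldl (fun best k => if best < bExt s j k 0 then bExt s j k 0 else best) b = bExt s j k 0) := by
    intro ks
    induction ks with
    | nil => intro b; simp
    | cons a t ih =>
      intro b
      simp only [List.foldl_cons, List.mem_cons]
      obtain ⟨ih1, ih2, ih3⟩ := ih (if b < bExt s j a 0 then bExt s j a 0 else b)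
      refine ⟨?_, ?_, ?_⟩
      · rintro k (rfl | hk)
        · exact le_trans (by split <;> omega) ih2
        · exact ih1 k hk
      · exact le_trans (by split <;> omega) ih2
      · by_cases hb : b < bExt s j a 0
        · rw [if_pos hb] at ih3 ⊢
          rcases ih3 with h | ⟨k, hk, h⟩
          · exact Or.inr ⟨a, Or.inl rfl, h⟩
          · exact Or.inr ⟨k, Or.inr hk, h⟩
        · rw [if_neg hb] at ih3 ⊢
          rcases ih3 with h | ⟨k, hk, h⟩
          · exact Or.inl h
          · exact Or.inr ⟨k, Or.inr hk, h⟩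
  obtain ⟨h1, _, h3⟩ := gen (List.range j) 0
  refine ⟨fun k hk => h1 k (List.mem_range.mpr hk), ?_⟩
  rcases h3 with h | ⟨k, hk, h⟩
  · exact Or.inl h
  · exact Or.inr ⟨k, List.mem_range.mp hk, h⟩

theorem bBest_le (s : List Char) (j : Nat) (hj : j < s.length) : bBest s j ≤ s.length - j := by
  rcases (bBest_spec s j).2 with h | ⟨k, hk, h⟩
  · omega
  · have := (bExt_ge_iff s j k (bExt s j k 0) hk hj).mp le_rfl
    omega

theorem occ_bBest (s : List Char) (j : Nat) (hj : j < s.length) : occ s j (bBest s j) := by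
  rcases (bBest_spec s j).2 with h | ⟨k, hk, h⟩
  · rw [h]; exact occ_zero s j
  · have := (bExt_ge_iff s j k (bExt s j k 0) hk hj).mp le_rfl
    exact ⟨k, by omega, by rw [h]; exact this.2.2⟩

theorem le_bBest_of_occ (s : List Char) (j l : Nat) (hj : j < s.length)
    (hl : j + l ≤ s.length) (h : occ s j l) : l ≤ bBest s j := by
  rcases Nat.eq_zero_or_pos l with rfl | hpos
  · omega
  · obtain ⟨k, hk, he⟩ := h
    have hkj : k < j := by omega
    have : l ≤ bExt s j k 0 := (bExt_ge_iff s j k l hkj hj).mpr ⟨hk, hl, he⟩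
    exact le_trans this ((bBest_spec s j).1 k hkj)

-- the slices in aInner reduced to drop/take
theorem aInner_eq (s : List Char) (j i : Nat) :
    aInner s j i =
      if PySem.Chars.isIn ((s.drop j).take (i + 1 - j)) (s.take j) = true then
        (if i + 1 > s.length then i + 1 else aInner s j (i + 1))
      else i := by
  rw [aInner]
  have h1 : PySem.List.slice s (some (j : Int)) (some ((i : Int) + 1)) = (s.drop j).take (i + 1 - j) := by
    have : ((i : Int) + 1) = ((i + 1 : Nat) : Int) := by push_cast; ring
    rw [this, PySem.List.slice_natCast]
  have h2 : PySem.List.slice s (some 0) (some (j : Int)) = s.take j := by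
    have h0 : (0 : Int) = ((0 : Nat) : Int) := rfl
    rw [h0, PySem.List.slice_natCast]
    simp
  rw [h1, h2]

-- A's inner loop lands exactly at j + best (or at |s|+1 when the whole tail matches)
theorem inner_main (s : List Char) (j i : Nat) (hjn : j < s.length) (hji : j ≤ i)
    (hin : i ≤ s.length) (hocc : occ s j (i - j)) (hle : i - j ≤ bBest s j) :
    aInner s j i = if bBest s j = s.length - j then s.length + 1 else j + bBest s j := by
  have hB := bBest_le s j hjn
  rcases Nat.lt_or_ge i s.length with hi | hi
  · -- i < |s|: pattern length i+1-j ≤ |s|-j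
    rw [aInner_eq]
    rcases Nat.lt_or_ge (i - j) (bBest s j) with hlt | hge
    · -- still inside the best match: the test succeeds
      have hmem : PySem.Chars.isIn ((s.drop j).take (i + 1 - j)) (s.take j) = true := by
        rw [mem_iff s j (i + 1 - j) (by omega) (by omega)]
        exact occ_mono (occ_bBest s j hjn) (by omega)
      rw [if_pos hmem, if_neg (by omega)]
      exact inner_main s j (i + 1) hjn (by omega) (by omega)
        (occ_mono (occ_bBest s j hjn) (by omega)) (by omega)
    · -- i - j = best and best < |s| - j: the test fails, return i = j + best
      have heq : i - j = bBest s j := by omega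
      have hltn : bBest s j < s.length - j := by omega
      have hmem : ¬ PySem.Chars.isIn ((s.drop j).take (i + 1 - j)) (s.take j) = true := by
        rw [mem_iff s j (i + 1 - j) (by omega) (by omega)]
        intro hocc'
        have := le_bBest_of_occ s j (i + 1 - j) hjn (by omega) hocc'
        omega
      rw [if_neg hmem, if_neg (by omega)]
      omega
  · -- i = |s|: the clamped pattern is the whole tail, which matches; break to |s|+1
    have hieq : i = s.length := by omega
    have hBeq : bBest s j = s.length - j := by omega
    rw [aInner_eq]
    have htake : (s.drop j).take (i + 1 - j) = (s.drop j).take (s.length - j) := by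
      rw [hieq]
      rw [List.take_of_length_le (by simp [List.length_drop]; omega),
          List.take_of_length_le (by simp [List.length_drop])]
    have hmem : PySem.Chars.isIn ((s.drop j).take (i + 1 - j)) (s.take j) = true := by
      rw [htake, mem_iff s j (s.length - j) (by omega) (by omega)]
      exact hBeq ▸ occ_bBest s j hjn
    rw [if_pos hmem, if_pos (by omega), if_pos hBeq]
    omega
termination_by s.length - i

theorem outer_eq (s : List Char) (count : Int) (i : Nat) :
    aOuter s count i = bOuter s count i := by
  rw [aOuter, bOuter]
  rcases Nat.lt_or_ge i s.length with hi | hi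
  · rw [if_pos hi, if_pos hi]
    have hinner := inner_main s i i hi le_rfl (by omega) (by simpa using occ_zero s i) (by omega)
    have hB := bBest_le s i hi
    rcases Nat.eq_or_lt_of_le hB with heq | hlt
    · -- whole tail matched: both next indices exceed |s|, both loops stop at count+1
      rw [hinner, if_pos heq]
      rw [aOuter, bOuter]
      rw [if_neg (by omega), if_neg (by omega)]
    · rw [hinner, if_neg (by omega)]
      exact outer_eq s (count + 1) (i + bBest s i + 1)
  · rw [if_neg (by omega), if_neg (by omega)]
termination_by s.length - i
decreasing_by omega

-- ===== VERDICT (by name: the statement is the Claim_ definition above) =====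
theorem calc_lz_distance_spec : Claim_equal_calc_lz_distance := by
  intro source seq flagGen start _ _
  unfold Spec_calc_lz_distance calc_lz_distance calc_lz_distance_alt
  split <;> exact outer_eq _ _ _
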